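-- pv_equiv track=rewrite | github.com/awstasiuk/mit-phd | nmresearch/lanczos/utils.py | index_to_base
-- ===== SOURCE A (Python) =====
-- def index_to_base(n, b=4, str_len=4):
--     if n == 0:
--         return "0" * str_len
--     digits = ""
--     while n:
--         digits += str(n % b)
--         n //= b
--     k = len(digits)
--     return ("0" * (str_len - k)) + digits[::-1]
-- ===== SOURCE B (Python) =====
-- def index_to_base(n, b=4, str_len=4):
--     def go(m):
--         return "" if m == 0 else go(m // b) + str(m % b)
--     return go(n).zfill(str_len)
-- ===== Notes on version B (the rewrite author's own statement) =====
-- stated objective: simpler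
-- what changed: B replaces A's accumulate-LSB-then-reverse while loop plus separate n==0 guard and manual zero padding by a recursion over n//b that emits digits most-significant first, then a single .zfill(str_len).
-- outside the precondition, e.g. on index_to_base(12, 16, 4): A returns '0021', B returns '0012'; on index_to_base(5, -4, 4): A returns '2-3-', B returns '-2-3'
import Mathlib
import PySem

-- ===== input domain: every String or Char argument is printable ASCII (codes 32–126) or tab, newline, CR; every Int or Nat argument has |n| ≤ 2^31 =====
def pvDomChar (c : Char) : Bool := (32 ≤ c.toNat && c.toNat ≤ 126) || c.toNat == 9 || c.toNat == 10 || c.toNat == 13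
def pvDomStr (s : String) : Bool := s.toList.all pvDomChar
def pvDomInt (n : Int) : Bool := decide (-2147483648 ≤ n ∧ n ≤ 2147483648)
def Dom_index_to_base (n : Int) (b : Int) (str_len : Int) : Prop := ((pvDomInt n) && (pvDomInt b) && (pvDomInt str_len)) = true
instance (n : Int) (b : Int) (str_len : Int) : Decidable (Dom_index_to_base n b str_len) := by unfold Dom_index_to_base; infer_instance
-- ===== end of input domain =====

-- B emits base-b digits most-significant-first by recursion on n // b and pads with zfill,
-- replacing A's accumulate-then-reverse loop, its n==0 guard and manual padding (objective: simpler).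


-- ===== PORT A =====
-- while n: digits += str(n % b); n //= b   — fuel n.toNat+1 only makes the loop total;
-- inside Pre_ the loop runs at most n.toNat times, so the fuel never runs out.
def aLoop : Nat → List Char → Int → Int → List Char
  | 0, digits, _, _ => digits
  | fuel + 1, digits, n, b =>
    if n ≠ 0 then
      aLoop fuel (digits ++ PySem.Int.toChars (PySem.Int.mod n b)) (PySem.Int.floordiv n b) b
    else digits

def index_to_base (n : Int) (b : Int) (str_len : Int) : String :=
  if n = 0 then String.ofList (PySem.List.pyRepeat ['0'] str_len)
  else
    let digits := aLoop (n.toNat + 1) [] n b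
    let k : Int := digits.length
    -- digits[::-1]: step -1 ≠ 0, so slice? never returns none; .getD [] is unreachable
    String.ofList (PySem.List.pyRepeat ['0'] (str_len - k) ++
               (PySem.List.slice? digits none none (-1)).getD [])

-- ===== PORT B =====
-- go(m) = "" if m == 0 else go(m // b) + str(m % b)   — same total-making fuel n.toNat+1
def bGo : Nat → Int → Int → List Char
  | 0, _, _ => []
  | fuel + 1, m, b =>
    if m = 0 then []
    else bGo fuel (PySem.Int.floordiv m b) b ++ PySem.Int.toChars (PySem.Int.mod m b)

def index_to_base_alt (n : Int) (b : Int) (str_len : Int) : String :=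
  String.ofList (PySem.Chars.zfill (bGo (n.toNat + 1) n b) str_len)

-- ===== PRECONDITION & SPEC =====
-- Pre_ excludes n < 0 and b ≤ 1 with n ≠ 0 (there A's while loop never terminates, or divides
-- by zero at b = 0), and bases where some str(n % b) is not a single digit character (b < 0,
-- or b > 10 unless n itself is a single digit): there A still returns, but its character-wise
-- reversal garbles the multi-character digits — a value no caller would specify; B returns the
-- digits in order there.
def Pre_index_to_base (n : Int) (b : Int) (str_len : Int) : Prop :=
  n = 0 ∨ (0 < n ∧ 2 ≤ b ∧ (b ≤ 10 ∨ n ≤ 9))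
instance (n : Int) (b : Int) (str_len : Int) : Decidable (Pre_index_to_base n b str_len) := by
  unfold Pre_index_to_base; infer_instance
def pvWitness_index_to_base : Int × Int × Int := (11, 4, 4)

def Spec_index_to_base (n : Int) (b : Int) (str_len : Int) (out : String) : Prop :=
  out = index_to_base_alt n b str_len
instance (n : Int) (b : Int) (str_len : Int) (out : String) : Decidable (Spec_index_to_base n b str_len out) := by
  unfold Spec_index_to_base; infer_instance

-- ===== CLAIM (what is proved, stated in full; the proofs are below) =====
def Claim_equal_index_to_base : Prop :=
  ∀ (n : Int) (b : Int) (str_len : Int), Dom_index_to_base n b str_len →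
    Pre_index_to_base n b str_len →
    Spec_index_to_base n b str_len (index_to_base n b str_len)

-- ===== LEMMAS AND PROOFS =====

-- str(n % b) is a single digit character when 0 ≤ d ≤ 9
lemma toChars_digit (d : Int) (h0 : 0 ≤ d) (h9 : d ≤ 9) :
    ∃ c : Char, PySem.Int.toChars d = [c] ∧ '0' ≤ c ∧ c ≤ '9' := by
  interval_cases d <;>
    first
      | exact ⟨'0', by rfl, by decide⟩
      | exact ⟨'1', by rfl, by decide⟩
      | exact ⟨'2', by rfl, by decide⟩
      | exact ⟨'3', by rfl, by decide⟩
      | exact ⟨'4', by rfl, by decide⟩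
      | exact ⟨'5', by rfl, by decide⟩
      | exact ⟨'6', by rfl, by decide⟩
      | exact ⟨'7', by rfl, by decide⟩
      | exact ⟨'8', by rfl, by decide⟩
      | exact ⟨'9', by rfl, by decide⟩

lemma floordiv_toNat_lt (n b : Int) (hn : 0 < n) (hb : 2 ≤ b) :
    (PySem.Int.floordiv n b).toNat < n.toNat := by
  have h1 : n = ((n.toNat : Nat) : Int) := by omega
  have h2 : b = ((b.toNat : Nat) : Int) := by omega
  rw [h1, h2, PySem.Int.floordiv_natCast, Int.toNat_natCast]
  exact Nat.lt_of_lt_of_le (Nat.div_lt_self (by omega) (by omega)) (le_refl _)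

-- n % b is at most 9 whenever b ≤ 10, or n itself is a single digit
lemma mod_le_nine (n b : Int) (hn : 0 < n) (hb : 2 ≤ b) (h : b ≤ 10 ∨ n ≤ 9) :
    PySem.Int.mod n b ≤ 9 := by
  have h1 := PySem.Int.mod_nonneg n (show (0:Int) < b by omega)
  have h2 := PySem.Int.mod_lt n (show (0:Int) < b by omega)
  rcases h with h | h
  · omega
  · have h3 := PySem.Int.floordiv_mul_add_mod n b
    have hq0 : 0 ≤ PySem.Int.floordiv n b := by
      have e1 : n = ((n.toNat : Nat) : Int) := by omega
      have e2 : b = ((b.toNat : Nat) : Int) := by omega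
      rw [e1, e2, PySem.Int.floordiv_natCast]; positivity
    by_cases hq : PySem.Int.floordiv n b = 0
    · rw [hq] at h3; omega
    · nlinarith

-- core: A's loop result is B's recursion reversed (same fuel, digits appended at the left)
lemma aLoop_eq_bGo_reverse (fuel : Nat) :
    ∀ (ds : List Char) (n b : Int), 0 ≤ n → 2 ≤ b → (b ≤ 10 ∨ n ≤ 9) → n.toNat < fuel →
      aLoop fuel ds n b = ds ++ (bGo fuel n b).reverse := by
  induction fuel with
  | zero => intro ds n b _ _ _ h; omega
  | succ fuel ih =>
    intro ds n b hn hb hb10 hf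
    by_cases h0 : n = 0
    · simp [aLoop, bGo, h0]
    · have hpos : 0 < n := by omega
      have hmod0 : 0 ≤ PySem.Int.mod n b := PySem.Int.mod_nonneg n (by omega)
      have hmod9 : PySem.Int.mod n b ≤ 9 := mod_le_nine n b hpos hb hb10
      obtain ⟨c, hc, _, _⟩ := toChars_digit _ hmod0 hmod9
      have hq0 : 0 ≤ PySem.Int.floordiv n b := by
        have h1 : n = ((n.toNat : Nat) : Int) := by omega
        have h2 : b = ((b.toNat : Nat) : Int) := by omega
        rw [h1, h2, PySem.Int.floordiv_natCast]; positivity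
      have hqf : (PySem.Int.floordiv n b).toNat < fuel := by
        have := floordiv_toNat_lt n b hpos hb; omega
      simp only [aLoop, bGo, h0, ne_eq, if_false, ite_not]
      have hb10' : b ≤ 10 ∨ PySem.Int.floordiv n b ≤ 9 := by
        rcases hb10 with h | h
        · exact Or.inl h
        · right; have := floordiv_toNat_lt n b hpos hb; omega
      rw [ih (ds ++ PySem.Int.toChars (PySem.Int.mod n b)) _ b hq0 hb hb10' hqf]
      simp [hc]

-- every character bGo produces is a decimal digit (so zfill sees no sign)
lemma bGo_digits (fuel : Nat) :
    ∀ (n b : Int), 0 ≤ n → 2 ≤ b → (b ≤ 10 ∨ n ≤ 9) →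
      ∀ c ∈ bGo fuel n b, '0' ≤ c ∧ c ≤ '9' := by
  induction fuel with
  | zero => intro n b _ _ _ c hc; simp [bGo] at hc
  | succ fuel ih =>
    intro n b hn hb hb10 c hc
    by_cases h0 : n = 0
    · simp [bGo, h0] at hc
    · have hmod0 : 0 ≤ PySem.Int.mod n b := PySem.Int.mod_nonneg n (by omega)
      have hmod9 : PySem.Int.mod n b ≤ 9 := mod_le_nine n b (by omega) hb hb10
      obtain ⟨d, hd, hd0, hd9⟩ := toChars_digit _ hmod0 hmod9
      have hq0 : 0 ≤ PySem.Int.floordiv n b := by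
        have h1 : n = ((n.toNat : Nat) : Int) := by omega
        have h2 : b = ((b.toNat : Nat) : Int) := by omega
        rw [h1, h2, PySem.Int.floordiv_natCast]; positivity
      simp only [bGo, if_neg h0, hd, List.mem_append, List.mem_singleton] at hc
      rcases hc with hc | hc
      · have hb10' : b ≤ 10 ∨ PySem.Int.floordiv n b ≤ 9 := by
          rcases hb10 with h | h
          · exact Or.inl h
          · right; have := floordiv_toNat_lt n b (by omega) hb; omega
        exact ih _ b hq0 hb hb10' c hc
      · subst hc; exact ⟨hd0, hd9⟩

-- zfill on a sign-free string is plain left zero padding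
lemma zfill_no_sign (cs : List Char) (w : Int)
    (h : ∀ c ∈ cs, '0' ≤ c ∧ c ≤ '9') :
    PySem.Chars.zfill cs w = List.replicate (w.toNat - cs.length) '0' ++ cs := by
  unfold PySem.Chars.zfill
  split_ifs with hle
  · have : w.toNat - cs.length = 0 := by omega
    simp [this]
  · cases cs with
    | nil => simp
    | cons c rest =>
      have hc := h c (by simp)
      have : ¬ (c = '+' ∨ c = '-') := by
        rintro (rfl | rfl) <;> revert hc <;> decide
      simp [this]

theorem equal_main (n b str_len : Int) (hpre : Pre_index_to_base n b str_len) :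
    index_to_base n b str_len = index_to_base_alt n b str_len := by
  rcases hpre with h0 | ⟨hn, hb, hb10⟩
  · subst h0
    simp [index_to_base, index_to_base_alt, bGo,
      zfill_no_sign [] str_len (by simp), PySem.List.pyRepeat_singleton]
  · have hne : n ≠ 0 := by omega
    have hfuel : n.toNat < n.toNat + 1 := by omega
    have hkey := aLoop_eq_bGo_reverse (n.toNat + 1) [] n b (by omega) hb hb10 hfuel
    have hdig := bGo_digits (n.toNat + 1) n b (by omega) hb hb10
    simp only [index_to_base, index_to_base_alt, if_neg hne]
    rw [hkey, PySem.List.slice?_none_none_neg_one]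
    simp only [List.nil_append, Option.getD_some, List.reverse_reverse,
      List.length_reverse, PySem.List.pyRepeat_singleton,
      zfill_no_sign _ str_len hdig]
    have hlen : (str_len - ((bGo (n.toNat + 1) n b).length : Int)).toNat
        = str_len.toNat - (bGo (n.toNat + 1) n b).length := by omega
    rw [hlen]

-- ===== VERDICT (by name: the statement is the Claim_ definition above) =====
theorem index_to_base_spec : Claim_equal_index_to_base := by
  intro n b str_len _ hpre
  unfold Spec_index_to_base
  exact equal_main n b str_len hpre
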